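-- pv_equiv track=rewrite | github.com/k14i-Azure/azure-openai-code-challenge | challenges/Codewars/1kyu/Loopover/code-davinci-002/prompts/0/solutions/2.py | loopover
-- ===== SOURCE A (Python) =====
-- from typing import List, Optional
--
-- def loopover(mixed_up_board: List[List[str]], solved_board: List[List[str]]) -> Optional[List[str]]:
--     if len(mixed_up_board) != len(solved_board) or len(mixed_up_board[0]) != len(solved_board[0]):
--         return None
--     n = len(mixed_up_board)
--     m = len(mixed_up_board[0])
--     board = mixed_up_board
--     moves = []
--     for i in range(n):
--         for j in range(m):
--             if board[i][j] != solved_board[i][j]: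
--                 for k in range(n):
--                     if board[k][j] == solved_board[i][j]:
--                         moves.append('D' + str(j))
--                         board = move_down(board, j)
--                         break
--                 for k in range(m):
--                     if board[i][k] == solved_board[i][j]:
--                         moves.append('R' + str(i))
--                         board = move_right(board, i)
--                         break
--     return moves
--
-- def move_down(board, j):
--     n = len(board)
--     m = len(board[0])
--     new_board = []
--     for i in range(n):
--         new_board.append([])
--         for k in range(m):
--             new_board[i].append(board[(i + 1) % n][k])
--     return new_board
--
-- def move_right(board, i):
--     n = len(board)
--     m = len(board[0])
--     new_board = []
--     for k in range(n):
--         new_board.append([])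
--         for j in range(m):
--             new_board[k].append(board[k][(j + 1) % m])
--     return new_board
-- ===== SOURCE B (Python) =====
-- def loopover(mixed_up_board, solved_board):
--     if len(mixed_up_board) != len(solved_board) or len(mixed_up_board[0]) != len(solved_board[0]):
--         return None
--     n, m = len(mixed_up_board), len(mixed_up_board[0])
--     d = r = 0
--     moves = []
--     for i in range(n):
--         for j in range(m):
--             t = solved_board[i][j]
--             if mixed_up_board[(i + d) % n][(j + r) % m] != t:
--                 if any(mixed_up_board[(k + d) % n][(j + r) % m] == t for k in range(n)):
--                     moves.append('D' + str(j))
--                     d += 1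
--                 if any(mixed_up_board[(i + d) % n][(k + r) % m] == t for k in range(m)):
--                     moves.append('R' + str(i))
--                     r += 1
--     return moves
-- ===== Notes on version B (the rewrite author's own statement) =====
-- stated objective: faster
-- what changed: B never materialises a board: instead of rebuilding the whole n*m board on every move (move_down/move_right), it keeps two integer offsets d,r and reads cell (i,j) as mixed_up_board[(i+d)%n][(j+r)%m], so each move costs O(1) instead of O(n*m).
import Mathlib
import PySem

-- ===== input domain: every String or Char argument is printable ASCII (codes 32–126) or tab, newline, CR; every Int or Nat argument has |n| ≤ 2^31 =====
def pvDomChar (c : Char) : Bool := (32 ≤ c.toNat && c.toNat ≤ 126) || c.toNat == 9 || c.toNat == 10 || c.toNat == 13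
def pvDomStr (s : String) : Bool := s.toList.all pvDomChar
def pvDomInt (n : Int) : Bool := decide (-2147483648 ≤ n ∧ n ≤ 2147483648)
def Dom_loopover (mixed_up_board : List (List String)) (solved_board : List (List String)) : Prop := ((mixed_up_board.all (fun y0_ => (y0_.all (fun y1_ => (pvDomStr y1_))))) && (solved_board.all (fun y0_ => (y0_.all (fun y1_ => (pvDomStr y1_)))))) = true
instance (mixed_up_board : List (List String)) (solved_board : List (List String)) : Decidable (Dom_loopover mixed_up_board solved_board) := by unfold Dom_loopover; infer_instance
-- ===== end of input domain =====

-- B replaces A's O(n*m) board rebuild on every move by two running offsets (d, r) and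
-- reads cell (i,j) directly from the original board at ((i+d)%n, (j+r)%m); objective: faster.

-- ===== PORT A =====
-- literal port of move_down (Python ignores its second argument's value; whole board shifts up one row)
def move_down (board : List (List String)) (_j : Nat) : List (List String) :=
  let n := board.length
  let m := (board.getD 0 []).length
  (List.range n).map (fun i => (List.range m).map (fun k => (board.getD ((i + 1) % n) []).getD k ""))

-- literal port of move_right (whole board shifts left one column)
def move_right (board : List (List String)) (_i : Nat) : List (List String) :=
  let n := board.length
  let m := (board.getD 0 []).length
  (List.range n).map (fun k => (List.range m).map (fun j => (board.getD k []).getD ((j + 1) % m) ""))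

-- the two inner `for k ... break` searches are folds carrying a done-flag (the break)
def loopover (mixed_up_board : List (List String)) (solved_board : List (List String)) : Option (List String) :=
  if mixed_up_board.length ≠ solved_board.length ∨ (mixed_up_board.getD 0 []).length ≠ (solved_board.getD 0 []).length then none
  else
    let n := mixed_up_board.length
    let m := (mixed_up_board.getD 0 []).length
    let final := (List.range n).foldl (fun st i =>
      (List.range m).foldl (fun (st : List (List String) × List String) j =>
        let target := (solved_board.getD i []).getD j ""
        if (st.1.getD i []).getD j "" ≠ target then
          let st1 := ((List.range n).foldl (fun (s : (List (List String) × List String) × Bool) k =>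
              if s.2 then s
              else if ((s.1.1.getD k []).getD j "" == target) then
                ((move_down s.1.1 j, s.1.2 ++ ["D" ++ toString j]), true)
              else s) (st, false)).1
          let st2 := ((List.range m).foldl (fun (s : (List (List String) × List String) × Bool) k =>
              if s.2 then s
              else if ((s.1.1.getD i []).getD k "" == target) then
                ((move_right s.1.1 i, s.1.2 ++ ["R" ++ toString i]), true)
              else s) (st1, false)).1
          st2
        else st) st) (mixed_up_board, ([] : List String))
    some final.2

-- ===== PORT B =====
def loopover_alt (mixed_up_board : List (List String)) (solved_board : List (List String)) : Option (List String) :=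
  if mixed_up_board.length ≠ solved_board.length ∨ (mixed_up_board.getD 0 []).length ≠ (solved_board.getD 0 []).length then none
  else
    let n := mixed_up_board.length
    let m := (mixed_up_board.getD 0 []).length
    let final := (List.range n).foldl (fun st i =>
      (List.range m).foldl (fun (st : Nat × Nat × List String) j =>
        let t := (solved_board.getD i []).getD j ""
        if (mixed_up_board.getD ((i + st.1) % n) []).getD ((j + st.2.1) % m) "" ≠ t then
          let st1 : Nat × Nat × List String :=
            if (List.range n).any (fun k => (mixed_up_board.getD ((k + st.1) % n) []).getD ((j + st.2.1) % m) "" == t)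
            then (st.1 + 1, st.2.1, st.2.2 ++ ["D" ++ toString j]) else st
          if (List.range m).any (fun k => (mixed_up_board.getD ((i + st1.1) % n) []).getD ((k + st1.2.1) % m) "" == t)
          then (st1.1, st1.2.1 + 1, st1.2.2 ++ ["R" ++ toString i]) else st1
        else st) st) ((0, 0, ([] : List String)) : Nat × Nat × List String)
    some final.2.2

-- ===== PRECONDITION & SPEC =====
-- Pre_ excludes exactly the inputs where Python A raises IndexError: equal-length empty boards
-- (mixed_up_board[0] fails) and, when the two shapes match, boards containing a row shorter than
-- row 0 of mixed_up_board (those rows are eventually indexed out of range).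
def Pre_loopover (mixed_up_board : List (List String)) (solved_board : List (List String)) : Prop :=
  mixed_up_board.length ≠ solved_board.length ∨
    (mixed_up_board ≠ [] ∧
      ((mixed_up_board.getD 0 []).length ≠ (solved_board.getD 0 []).length ∨
        ((∀ row ∈ mixed_up_board, (mixed_up_board.getD 0 []).length ≤ row.length) ∧
         (∀ row ∈ solved_board, (mixed_up_board.getD 0 []).length ≤ row.length))))
instance (mixed_up_board : List (List String)) (solved_board : List (List String)) : Decidable (Pre_loopover mixed_up_board solved_board) := by unfold Pre_loopover; infer_instance

def pvWitness_loopover : List (List String) × List (List String) := ([["a", "b"], ["b", "a"]], [["a", "a"], ["b", "b"]])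

def Spec_loopover (mixed_up_board : List (List String)) (solved_board : List (List String)) (out : Option (List String)) : Prop := out = loopover_alt mixed_up_board solved_board
instance (mixed_up_board : List (List String)) (solved_board : List (List String)) (out : Option (List String)) : Decidable (Spec_loopover mixed_up_board solved_board out) := by unfold Spec_loopover; infer_instance

-- ===== CLAIM (what is proved, stated in full; the proofs are below) =====
def Claim_equal_loopover : Prop := ∀ (mixed_up_board : List (List String)) (solved_board : List (List String)), Dom_loopover mixed_up_board solved_board → Pre_loopover mixed_up_board solved_board → Spec_loopover mixed_up_board solved_board (loopover mixed_up_board solved_board)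

-- ===== LEMMAS AND PROOFS =====

-- getD of a map over a range
theorem getD_map_range {α : Type} (n i : Nat) (f : Nat → α) (d : α) (h : i < n) :
    ((List.range n).map f).getD i d = f i := by
  simp [List.getD, h]

-- the invariant relating A's rebuilt board to B's offsets
def BoardInv (mb : List (List String)) (n m : Nat) (board : List (List String)) (d r : Nat) : Prop :=
  board.length = n ∧ (board.getD 0 []).length = m ∧
    ∀ i < n, ∀ j < m, (board.getD i []).getD j "" = (mb.getD ((i + d) % n) []).getD ((j + r) % m) ""

def BoardRel (mb : List (List String)) (n m : Nat)
    (a : List (List String) × List String) (b : Nat × Nat × List String) : Prop :=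
  BoardInv mb n m a.1 b.1 b.2.1 ∧ a.2 = b.2.2

theorem inv_init (mb : List (List String)) :
    BoardInv mb mb.length (mb.getD 0 []).length mb 0 0 := by
  refine ⟨rfl, rfl, fun i hi j hj => ?_⟩
  rw [Nat.add_zero, Nat.add_zero, Nat.mod_eq_of_lt hi, Nat.mod_eq_of_lt hj]

theorem inv_move_down (mb board : List (List String)) (n m d r jj : Nat) (hn : 0 < n)
    (h : BoardInv mb n m board d r) : BoardInv mb n m (move_down board jj) (d + 1) r := by
  obtain ⟨hlen, hhead, hval⟩ := h
  unfold move_down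
  rw [hlen, hhead]
  refine ⟨by simp, ?_, ?_⟩
  · rw [getD_map_range n 0 _ _ hn]; simp
  · intro i hi j hj
    rw [getD_map_range n i _ _ hi, getD_map_range m j _ _ hj]
    rw [hval ((i + 1) % n) (Nat.mod_lt _ hn) j hj]
    congr 2
    rw [Nat.mod_add_mod]
    congr 1
    omega

theorem inv_move_right (mb board : List (List String)) (n m d r ii : Nat) (hn : 0 < n) (hm : 0 < m)
    (h : BoardInv mb n m board d r) : BoardInv mb n m (move_right board ii) d (r + 1) := by
  obtain ⟨hlen, hhead, hval⟩ := h
  unfold move_right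
  rw [hlen, hhead]
  refine ⟨by simp, ?_, ?_⟩
  · rw [getD_map_range n 0 _ _ hn]; simp
  · intro i hi j hj
    rw [getD_map_range n i _ _ hi, getD_map_range m j _ _ hj]
    rw [hval i hi ((j + 1) % m) (Nat.mod_lt _ hm)]
    have hidx : ((j + 1) % m + r) % m = (j + (r + 1)) % m := by
      rw [Nat.mod_add_mod]; congr 1; omega
    rw [hidx]

-- a fold carrying a done-flag that fires at most once computes `if any then f a else a`
theorem foldl_flag_done {σ : Type} (l : List Nat) (p : σ → Nat → Bool) (f : σ → σ) (a : σ) :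
    l.foldl (fun (s : σ × Bool) k => if s.2 then s else if p s.1 k then (f s.1, true) else s) (a, true)
      = (a, true) := by
  induction l with
  | nil => rfl
  | cons h t ih => simpa using ih

theorem foldl_break {σ : Type} (l : List Nat) (p : σ → Nat → Bool) (f : σ → σ) (a : σ) :
    (l.foldl (fun (s : σ × Bool) k => if s.2 then s else if p s.1 k then (f s.1, true) else s) (a, false)).1
      = if l.any (p a) then f a else a := by
  induction l generalizing a with
  | nil => simp
  | cons h t ih =>
    by_cases hp : p a h
    · simp [List.foldl_cons, hp, foldl_flag_done]
    · simp [List.foldl_cons, hp, ih]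

theorem any_congr_range (n : Nat) (p q : Nat → Bool) (h : ∀ k < n, p k = q k) :
    (List.range n).any p = (List.range n).any q := by
  induction n with
  | zero => rfl
  | succ k ih =>
    rw [List.range_succ]
    simp only [List.any_append, List.any_cons, List.any_nil]
    rw [ih (fun j hj => h j (Nat.lt_succ_of_lt hj)), h k (Nat.lt_succ_self k)]

-- fold two R-related states through related steps
theorem foldl_rel {α β γ : Type} (R : α → β → Prop) (f : α → γ → α) (g : β → γ → β)
    (l : List γ) (a : α) (b : β) (h : ∀ a b x, x ∈ l → R a b → R (f a x) (g b x)) (h0 : R a b) :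
    R (l.foldl f a) (l.foldl g b) := by
  induction l generalizing a b with
  | nil => exact h0
  | cons x t ih =>
    exact ih (f a x) (g b x) (fun a b y hy => h a b y (List.mem_cons_of_mem _ hy))
      (h a b x (List.mem_cons_self) h0)

-- the A-side break-fold over a column search, in closed form
theorem breakD (n' j : Nat) (target : String) (a : List (List String) × List String) :
    ((List.range n').foldl (fun (s : (List (List String) × List String) × Bool) k =>
        if s.2 then s
        else if ((s.1.1.getD k []).getD j "" == target) then
          ((move_down s.1.1 j, s.1.2 ++ ["D" ++ toString j]), true)
        else s) (a, false)).1
      = if (List.range n').any (fun k => ((a.1.getD k []).getD j "" == target))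
        then (move_down a.1 j, a.2 ++ ["D" ++ toString j]) else a :=
  foldl_break (List.range n') (fun s k => ((s.1.getD k []).getD j "" == target))
    (fun s => (move_down s.1 j, s.2 ++ ["D" ++ toString j])) a

theorem breakR (m' i : Nat) (target : String) (a : List (List String) × List String) :
    ((List.range m').foldl (fun (s : (List (List String) × List String) × Bool) k =>
        if s.2 then s
        else if ((s.1.1.getD i []).getD k "" == target) then
          ((move_right s.1.1 i, s.1.2 ++ ["R" ++ toString i]), true)
        else s) (a, false)).1
      = if (List.range m').any (fun k => ((a.1.getD i []).getD k "" == target))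
        then (move_right a.1 i, a.2 ++ ["R" ++ toString i]) else a :=
  foldl_break (List.range m') (fun s k => ((s.1.getD i []).getD k "" == target))
    (fun s => (move_right s.1 i, s.2 ++ ["R" ++ toString i])) a

-- ===== VERDICT (by name: the statement is the Claim_ definition above) =====
theorem loopover_spec : Claim_equal_loopover := by
  intro mb sb _ hpre
  unfold Spec_loopover loopover loopover_alt
  by_cases h1 : mb.length ≠ sb.length ∨ (mb.getD 0 []).length ≠ (sb.getD 0 []).length
  · rw [if_pos h1, if_pos h1]
  · rw [if_neg h1, if_neg h1]
    push_neg at h1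
    obtain ⟨hlen, _⟩ := h1
    have hmb : mb ≠ [] := by
      rcases hpre with h | ⟨h, _⟩
      · exact absurd hlen h
      · exact h
    have hn : 0 < mb.length := List.length_pos_iff.mpr hmb
    simp only []
    refine congrArg some ?_
    refine (foldl_rel
      (fun (a : List (List String) × List String) (b : Nat × Nat × List String) =>
        BoardRel mb mb.length ((mb.getD 0 []).length) a b)
      _ _ (List.range mb.length) (mb, ([] : List String)) ((0, 0, ([] : List String)))
      ?_ ⟨inv_init mb, rfl⟩).2
    intro a b i hi hR
    replace hi := List.mem_range.mp hi
    refine foldl_rel _ _ _ (List.range ((mb.getD 0 []).length)) a b ?_ hR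
    intro a' b' j hj hR'
    replace hj := List.mem_range.mp hj
    have hm : 0 < (mb.getD 0 []).length := by omega
    obtain ⟨⟨hblen, hbhead, hval⟩, hmoves⟩ := hR'
    rw [hval i hi j hj]
    by_cases hne : (mb.getD ((i + b'.1) % mb.length) []).getD ((j + b'.2.1) % (mb.getD 0 []).length) "" ≠ (sb.getD i []).getD j ""
    · rw [if_pos hne, if_pos hne]
      rw [breakD, breakR]
      rw [any_congr_range mb.length
        (fun k => ((a'.1.getD k []).getD j "" == (sb.getD i []).getD j ""))
        (fun k => ((mb.getD ((k + b'.1) % mb.length) []).getD ((j + b'.2.1) % (mb.getD 0 []).length) "" == (sb.getD i []).getD j ""))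
        (fun k hk => by simp only [hval k hk j hj])]
      by_cases hany1 : ((List.range mb.length).any (fun k => ((mb.getD ((k + b'.1) % mb.length) []).getD ((j + b'.2.1) % (mb.getD 0 []).length) "" == (sb.getD i []).getD j ""))) = true
      · simp only [if_pos hany1]
        obtain ⟨hblen1, hbhead1, hval1⟩ :=
          inv_move_down mb a'.1 mb.length ((mb.getD 0 []).length) b'.1 b'.2.1 j hn ⟨hblen, hbhead, hval⟩
        rw [any_congr_range ((mb.getD 0 []).length)
          (fun k => (((move_down a'.1 j).getD i []).getD k "" == (sb.getD i []).getD j ""))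
          (fun k => ((mb.getD ((i + (b'.1 + 1)) % mb.length) []).getD ((k + b'.2.1) % (mb.getD 0 []).length) "" == (sb.getD i []).getD j ""))
          (fun k hk => by simp only [hval1 i hi k hk])]
        by_cases hany2 : ((List.range ((mb.getD 0 []).length)).any (fun k => ((mb.getD ((i + (b'.1 + 1)) % mb.length) []).getD ((k + b'.2.1) % (mb.getD 0 []).length) "" == (sb.getD i []).getD j ""))) = true
        · simp only [if_pos hany2]
          exact ⟨inv_move_right mb (move_down a'.1 j) mb.length ((mb.getD 0 []).length) (b'.1 + 1) b'.2.1 i hn hm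
            ⟨hblen1, hbhead1, hval1⟩, by rw [hmoves]⟩
        · simp only [if_neg hany2]
          exact ⟨⟨hblen1, hbhead1, hval1⟩, by rw [hmoves]⟩
      · simp only [if_neg hany1]
        rw [any_congr_range ((mb.getD 0 []).length)
          (fun k => ((a'.1.getD i []).getD k "" == (sb.getD i []).getD j ""))
          (fun k => ((mb.getD ((i + b'.1) % mb.length) []).getD ((k + b'.2.1) % (mb.getD 0 []).length) "" == (sb.getD i []).getD j ""))
          (fun k hk => by simp only [hval i hi k hk])]
        by_cases hany2 : ((List.range ((mb.getD 0 []).length)).any (fun k => ((mb.getD ((i + b'.1) % mb.length) []).getD ((k + b'.2.1) % (mb.getD 0 []).length) "" == (sb.getD i []).getD j ""))) = true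
        · simp only [if_pos hany2]
          exact ⟨inv_move_right mb a'.1 mb.length ((mb.getD 0 []).length) b'.1 b'.2.1 i hn hm
            ⟨hblen, hbhead, hval⟩, by rw [hmoves]⟩
        · simp only [if_neg hany2]
          exact ⟨⟨hblen, hbhead, hval⟩, hmoves⟩
    · rw [if_neg hne, if_neg hne]
      exact ⟨⟨hblen, hbhead, hval⟩, hmoves⟩
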